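-- pv_equiv track=rewrite | github.com/yaodi962464/smzdm | zhangdama/geetest.py | fun_f
-- ===== SOURCE A (Python) =====
-- def fun_c(a):
--     g = []
--     e = []
--     f = 0
--     for h in range(len(a) - 1):
--         b = int(round(a[h + 1][0] - a[h][0]))
--         c = int(round(a[h + 1][1] - a[h][1]))
--         d = int(round(a[h + 1][2] - a[h][2]))
--         g.append([b, c, d])
--
--         if b == c == d == 0:
--             pass
--         else:
--             if b == c == 0:
--                 f += d
--             else:
--                 e.append([b, c, d + f])
--                 f = 0
--     if f != 0:
--         e.append([b, c, f])
--     return e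
--
-- def fun_e(item):  # 相当于e函数
--     b = [[1, 0], [2, 0], [1, -1], [1, 1], [0, 1], [0, -1], [3, 0], [2, -1], [2, 1]]
--     c = "stuvwxyz~"
--     for i, t in enumerate(b):
--         if t == item[:2]:
--             return c[i]
--     return 0
--
-- def fun_d(a):
--     b = "()*,-./0123456789:?@ABCDEFGHIJKLMNOPQRSTUVWXYZ_abcdefghijklmnopqr"
--     c = len(b)
--     d = ""
--     e = abs(a)
--     f = int(e / c)
--     if f >= c:
--         f = c - 1
--     if f > 0:
--         d = b[f]
--     e %= c
--     g = ""
--     if a < 0: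
--         g += "!"
--     if d:
--         g += "$"
--     return g + d + b[e]
--
-- def fun_f(track_list):
--     skip_list = fun_c(track_list)
--     g, h, i = [], [], []
--     for j in range(len(skip_list)):
--         b = fun_e(skip_list[j])
--         if b:
--             h.append(b)
--         else:
--             g.append(fun_d(skip_list[j][0]))
--             h.append(fun_d(skip_list[j][1]))
--         i.append(fun_d(skip_list[j][2]))
--     return "".join(g) + "!!" + "".join(h) + "!!" + "".join(i)
-- ===== SOURCE B (Python) =====
-- # B: single fused pass -- no intermediate skip_list; fun_e replaced by a dict lookup;
-- # the trailing flush is always the entry [0, 0, f] (whenever f != 0 at loop end the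
-- # last iteration had b == c == 0), emitted directly.
--
-- def fun_d(a):
--     b = "()*,-./0123456789:?@ABCDEFGHIJKLMNOPQRSTUVWXYZ_abcdefghijklmnopqr"
--     c = len(b)
--     d = ""
--     e = abs(a)
--     f = int(e / c)
--     if f >= c:
--         f = c - 1
--     if f > 0:
--         d = b[f]
--     e %= c
--     g = ""
--     if a < 0:
--         g += "!"
--     if d:
--         g += "$"
--     return g + d + b[e]
--
-- TBL = {(1, 0): 's', (2, 0): 't', (1, -1): 'u', (1, 1): 'v', (0, 1): 'w',
--        (0, -1): 'x', (3, 0): 'y', (2, -1): 'z', (2, 1): '~'}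
--
-- def fun_f(track_list):
--     g = h = i = ""
--     f = 0
--     for k in range(len(track_list) - 1):
--         p, q = track_list[k], track_list[k + 1]
--         b, c, d = q[0] - p[0], q[1] - p[1], q[2] - p[2]
--         if b == 0 and c == 0:
--             f += d
--             continue
--         ch = TBL.get((b, c))
--         if ch:
--             h += ch
--         else:
--             g += fun_d(b)
--             h += fun_d(c)
--         i += fun_d(d + f)
--         f = 0
--     if f != 0:
--         g += fun_d(0)
--         h += fun_d(0)
--         i += fun_d(f)
--     return g + "!!" + h + "!!" + i
-- ===== Notes on version B (the rewrite author's own statement) =====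
-- stated objective: simpler
-- what changed: One fused pass over the track replaces the two-stage pipeline (fun_c building an intermediate skip_list, then a second loop encoding it): deltas are encoded and emitted into the three output strings immediately, fun_e's linear table scan becomes a dict lookup, and the trailing flush emits [0,0,f] directly (when f!=0 survives the loop the last deltas necessarily had b==c==0).
import Mathlib
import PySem

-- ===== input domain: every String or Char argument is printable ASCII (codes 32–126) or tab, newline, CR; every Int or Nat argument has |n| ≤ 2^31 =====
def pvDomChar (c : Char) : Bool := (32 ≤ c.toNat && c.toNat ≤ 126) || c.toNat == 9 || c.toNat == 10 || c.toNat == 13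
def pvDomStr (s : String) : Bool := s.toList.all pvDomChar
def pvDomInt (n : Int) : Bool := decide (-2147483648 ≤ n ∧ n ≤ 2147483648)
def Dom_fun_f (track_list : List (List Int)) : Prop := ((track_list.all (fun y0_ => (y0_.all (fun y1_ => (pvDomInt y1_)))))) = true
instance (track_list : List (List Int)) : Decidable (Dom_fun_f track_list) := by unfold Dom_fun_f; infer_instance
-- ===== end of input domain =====

-- B fuses A's two passes (fun_c building skip_list, then the encoding loop) into one
-- pass emitting the three output strings directly, with fun_e replaced by a dict lookup.

-- ===== PORT A =====
-- r[i] for a Nat index i: none = IndexError, excluded by Pre_; .getD 0 only totalises.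
def getI (r : List Int) (i : Nat) : Int := (PySem.List.pyGet? r (i : Int)).getD 0

-- s[i] for an in-range index, as a 1-char string ("" unreachable: all uses are in range).
def charAt (s : String) (i : Int) : String := ((PySem.Str.pyGet? s i).map (fun ch => String.ofList [ch])).getD ""

-- fun_c's loop over h in range(len(a)-1): structural recursion over consecutive pairs;
-- the state carries (g, e, f, b, c) exactly as Python's variables (b, c survive the loop).
-- int(round(x - y)) on ints is x - y.
def fun_c_loop : List (List Int) → List (List Int) × List (List Int) × Int × Int × Int → List (List Int) × List (List Int) × Int × Int × Int
  | x :: y :: rest, (g, e, f, _, _) =>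
      let b := getI y 0 - getI x 0
      let c := getI y 1 - getI x 1
      let d := getI y 2 - getI x 2
      let g := g ++ [[b, c, d]]
      if b = 0 ∧ c = 0 ∧ d = 0 then
        fun_c_loop (y :: rest) (g, e, f, b, c)
      else if b = 0 ∧ c = 0 then
        fun_c_loop (y :: rest) (g, e, f + d, b, c)
      else
        fun_c_loop (y :: rest) (g, e ++ [[b, c, d + f]], 0, b, c)
  | _, st => st

def fun_c (a : List (List Int)) : List (List Int) :=
  match fun_c_loop a ([], [], 0, 0, 0) with
  | (_, e, f, b, c) => if f ≠ 0 then e ++ [[b, c, f]] else e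

def etable : List (List Int) := [[1, 0], [2, 0], [1, -1], [1, 1], [0, 1], [0, -1], [3, 0], [2, -1], [2, 1]]
def echars : String := "stuvwxyz~"

-- fun_e: first i with b[i] == item[:2]; Python returns c[i] (a char) or 0: Option Char, none = 0.
-- c[i] is always in range (i < 9 = len(c)).
def fun_e_loop (item2 : List Int) : List (Int × List Int) → Option Char
  | [] => none
  | (i, t) :: rest => if t = item2 then PySem.Str.pyGet? echars i else fun_e_loop item2 rest

def fun_e (item : List Int) : Option Char :=
  fun_e_loop (PySem.List.slice item (some 0) (some 2)) (PySem.List.enumerate etable)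

def alphabet : String := "()*,-./0123456789:?@ABCDEFGHIJKLMNOPQRSTUVWXYZ_abcdefghijklmnopqr"

-- int(e / c): float division then truncation, exact for |e| < 2^53: PySem.Int.truncdiv.
def fun_d (a : Int) : String :=
  let b := alphabet
  let c : Int := PySem.Str.len b
  let e0 := |a|
  let f0 := PySem.Int.truncdiv e0 c
  let f := if f0 ≥ c then c - 1 else f0
  let d : String := if f > 0 then charAt b f else ""
  let e := PySem.Int.mod e0 c
  let g0 : String := ""
  let g1 := if a < 0 then g0 ++ "!" else g0
  let g := if d ≠ "" then g1 ++ "$" else g1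
  g ++ d ++ charAt b e

def fun_f_loop : List (List Int) → List String × List String × List String → List String × List String × List String
  | [], st => st
  | entry :: rest, (g, h, i) =>
      match fun_e entry with
      | some ch => fun_f_loop rest (g, h ++ [String.ofList [ch]], i ++ [fun_d (getI entry 2)])
      | none => fun_f_loop rest (g ++ [fun_d (getI entry 0)], h ++ [fun_d (getI entry 1)], i ++ [fun_d (getI entry 2)])

def fun_f (track_list : List (List Int)) : String :=
  let skip := fun_c track_list
  match fun_f_loop skip ([], [], []) with
  | (g, h, i) => PySem.Str.join "" g ++ "!!" ++ PySem.Str.join "" h ++ "!!" ++ PySem.Str.join "" i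

-- ===== PORT B =====
def tbl : PySem.Dict (Int × Int) Char :=
  PySem.Dict.ofList [((1, 0), 's'), ((2, 0), 't'), ((1, -1), 'u'), ((1, 1), 'v'), ((0, 1), 'w'),
                     ((0, -1), 'x'), ((3, 0), 'y'), ((2, -1), 'z'), ((2, 1), '~')]

-- B's single loop over consecutive pairs; state = (g, h, i, f), strings built directly.
def fun_f_alt_loop : List (List Int) → String × String × String × Int → String × String × String × Int
  | x :: y :: rest, (g, h, i, f) =>
      let b := getI y 0 - getI x 0
      let c := getI y 1 - getI x 1
      let d := getI y 2 - getI x 2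
      if b = 0 ∧ c = 0 then
        fun_f_alt_loop (y :: rest) (g, h, i, f + d)
      else
        match PySem.Dict.get? tbl (b, c) with
        | some ch => fun_f_alt_loop (y :: rest) (g, h ++ String.ofList [ch], i ++ fun_d (d + f), 0)
        | none => fun_f_alt_loop (y :: rest) (g ++ fun_d b, h ++ fun_d c, i ++ fun_d (d + f), 0)
  | _, st => st

def fun_f_alt (track_list : List (List Int)) : String :=
  match fun_f_alt_loop track_list ("", "", "", 0) with
  | (g, h, i, f) =>
      if f ≠ 0 then
        (g ++ fun_d 0) ++ "!!" ++ (h ++ fun_d 0) ++ "!!" ++ (i ++ fun_d f)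
      else
        g ++ "!!" ++ h ++ "!!" ++ i

-- ===== PRECONDITION & SPEC =====
-- Pre_ excludes exactly the inputs where A raises IndexError: with at least two rows,
-- every row must have at least 3 entries (indices 0,1,2 are read on every row).
def Pre_fun_f (track_list : List (List Int)) : Prop :=
  track_list.length ≤ 1 ∨ ∀ r ∈ track_list, 3 ≤ r.length
instance (track_list : List (List Int)) : Decidable (Pre_fun_f track_list) := by unfold Pre_fun_f; infer_instance

def pvWitness_fun_f : List (List Int) := [[0, 0, 0], [1, 2, 3], [1, 2, 9], [5, 2, 9]]

def Spec_fun_f (track_list : List (List Int)) (out : String) : Prop := out = fun_f_alt track_list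
instance (track_list : List (List Int)) (out : String) : Decidable (Spec_fun_f track_list out) := by unfold Spec_fun_f; infer_instance

-- ===== CLAIM (what is proved, stated in full; the proofs are below) =====
def Claim_equal_fun_f : Prop := ∀ (track_list : List (List Int)), Dom_fun_f track_list → Pre_fun_f track_list → Spec_fun_f track_list (fun_f track_list)

-- ===== LEMMAS AND PROOFS =====

-- intercalating the empty separator is flattening
theorem pvIntercalate_nil (l : List (List Char)) : List.intercalate [] l = l.flatten := by
  induction l with
  | nil => rfl
  | cons a l ih => cases l with
    | nil => simp [List.intercalate]
    | cons b m => simp_all [List.intercalate, List.intersperse, List.flatten]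

-- join "" (g ++ [s]) = join "" g ++ s
theorem pvJoin_append (g : List String) (s : String) :
    PySem.Str.join "" (g ++ [s]) = PySem.Str.join "" g ++ s := by
  rw [← String.toList_inj]
  simp [PySem.Str.toList_join, String.toList_append, PySem.Chars.join, pvIntercalate_nil]

theorem pvJoin_nil : PySem.Str.join "" ([] : List String) = "" := by
  rw [← String.toList_inj]
  simp [PySem.Str.toList_join, PySem.Chars.join, pvIntercalate_nil]

theorem getI0 (a0 a1 a2 : Int) : getI [a0, a1, a2] 0 = a0 := by
  simp [getI, pysem]
theorem getI1 (a0 a1 a2 : Int) : getI [a0, a1, a2] 1 = a1 := by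
  simp [getI, pysem]
theorem getI2 (a0 a1 a2 : Int) : getI [a0, a1, a2] 2 = a2 := by
  simp [getI, pysem]

-- fun_e on a 3-entry [b, c, x] is exactly B's dict lookup on (b, c)
theorem fun_e_eq_tbl (b c x : Int) : fun_e [b, c, x] = PySem.Dict.get? tbl (b, c) := by
  have hs : PySem.List.slice [b, c, x] (some 0) (some 2) = [b, c] := by simp [pysem]
  have ht : tbl = PySem.Dict.mk [((1, 0), 's'), ((2, 0), 't'), ((1, -1), 'u'), ((1, 1), 'v'),
      ((0, 1), 'w'), ((0, -1), 'x'), ((3, 0), 'y'), ((2, -1), 'z'), ((2, 1), '~')] := by rfl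
  have h0 : PySem.List.pyGet? echars.toList 0 = some 's' := by decide
  have h1 : PySem.List.pyGet? echars.toList 1 = some 't' := by decide
  have h2 : PySem.List.pyGet? echars.toList 2 = some 'u' := by decide
  have h3 : PySem.List.pyGet? echars.toList 3 = some 'v' := by decide
  have h4 : PySem.List.pyGet? echars.toList 4 = some 'w' := by decide
  have h5 : PySem.List.pyGet? echars.toList 5 = some 'x' := by decide
  have h6 : PySem.List.pyGet? echars.toList 6 = some 'y' := by decide
  have h7 : PySem.List.pyGet? echars.toList 7 = some 'z' := by decide
  have h8 : PySem.List.pyGet? echars.toList 8 = some '~' := by decide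
  rw [fun_e, hs, ht]
  simp only [etable, PySem.List.enumerate_cons, PySem.List.enumerate_nil, fun_e_loop,
    PySem.Dict.get?_mk_cons, beq_iff_eq, Prod.mk.injEq, List.cons.injEq, and_true]
  norm_num
  rw [h0, h1, h2, h3, h4, h5, h6, h7, h8]
  have hnone : (PySem.Dict.mk ([] : List ((Int × Int) × Char))).get? (b, c) = none := rfl
  rw [hnone]

-- fun_f_loop is a left fold: it distributes over append
theorem fun_f_loop_append (e1 e2 : List (List Int)) (st : List String × List String × List String) :
    fun_f_loop (e1 ++ e2) st = fun_f_loop e2 (fun_f_loop e1 st) := by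
  induction e1 generalizing st with
  | nil => rfl
  | cons en rest ih =>
      obtain ⟨g, h, i⟩ := st
      simp only [List.cons_append, fun_f_loop]
      cases fun_e en <;> exact ih _

-- B's state corresponding to A's accumulated skip entries e and carry f
def mkB (e : List (List Int)) (f : Int) : String × String × String × Int :=
  match fun_f_loop e ([], [], []) with
  | (g, h, i) => (PySem.Str.join "" g, PySem.Str.join "" h, PySem.Str.join "" i, f)

theorem mkB_fourth (e : List (List Int)) (f : Int) : (mkB e f).2.2.2 = f := by
  unfold mkB
  rcases fun_f_loop e ([], [], []) with ⟨G, H, I⟩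
  rfl

theorem mkB_carry (e : List (List Int)) (f z : Int) :
    ((mkB e f).1, (mkB e f).2.1, (mkB e f).2.2.1, z) = mkB e z := by
  unfold mkB
  rcases fun_f_loop e ([], [], []) with ⟨G, H, I⟩
  rfl

-- appending one flushed entry to e updates mkB exactly as B's flush does
theorem mkB_append (e : List (List Int)) (b c z f f' : Int) :
    mkB (e ++ [[b, c, z]]) f' =
      match PySem.Dict.get? tbl (b, c) with
      | some ch => ((mkB e f).1, (mkB e f).2.1 ++ String.ofList [ch], (mkB e f).2.2.1 ++ fun_d z, f')
      | none => ((mkB e f).1 ++ fun_d b, (mkB e f).2.1 ++ fun_d c, (mkB e f).2.2.1 ++ fun_d z, f') := by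
  unfold mkB
  rw [fun_f_loop_append]
  rcases hE : fun_f_loop e ([], [], []) with ⟨G, H, I⟩
  simp only [fun_f_loop, fun_e_eq_tbl, getI0, getI1, getI2]
  cases PySem.Dict.get? tbl (b, c) <;> simp [pvJoin_append]

-- Main invariant: B's loop from the state encoding (e, f) lands on the state encoding
-- A's loop result, and whenever the final carry is non-zero the final (b, c) are (0, 0).
theorem pv_main (rest : List (List Int)) : ∀ (x : List Int) (g e : List (List Int)) (f b0 c0 : Int),
    (f ≠ 0 → b0 = 0 ∧ c0 = 0) →
    fun_f_alt_loop (x :: rest) (mkB e f) =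
      mkB (fun_c_loop (x :: rest) (g, e, f, b0, c0)).2.1 (fun_c_loop (x :: rest) (g, e, f, b0, c0)).2.2.1 ∧
    ((fun_c_loop (x :: rest) (g, e, f, b0, c0)).2.2.1 ≠ 0 →
      (fun_c_loop (x :: rest) (g, e, f, b0, c0)).2.2.2.1 = 0 ∧
      (fun_c_loop (x :: rest) (g, e, f, b0, c0)).2.2.2.2 = 0) := by
  induction rest with
  | nil =>
      intro x g e f b0 c0 hf
      simp only [fun_c_loop, fun_f_alt_loop]
      exact ⟨trivial, hf⟩
  | cons y rest ih =>
      intro x g e f b0 c0 hf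
      by_cases hbc : getI y 0 - getI x 0 = 0 ∧ getI y 1 - getI x 1 = 0
      · by_cases hd : getI y 2 - getI x 2 = 0
        · simp only [fun_c_loop, fun_f_alt_loop, hbc.1, hbc.2, hd, and_self, if_true]
          simp only [add_zero, mkB_fourth, mkB_carry]
          exact ih y _ e f _ _ (fun _ => ⟨rfl, rfl⟩)
        · simp only [fun_c_loop, fun_f_alt_loop, hbc.1, hbc.2, hd, and_self]
          simp only [mkB_fourth, mkB_carry]
          exact ih y _ e (f + (getI y 2 - getI x 2)) _ _ (fun _ => ⟨rfl, rfl⟩)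
      · have h1 : ¬(getI y 0 - getI x 0 = 0 ∧ getI y 1 - getI x 1 = 0 ∧ getI y 2 - getI x 2 = 0) := by
          intro h; exact hbc ⟨h.1, h.2.1⟩
        simp only [fun_c_loop, fun_f_alt_loop, if_neg, h1, hbc, not_false_iff]
        simp only [mkB_fourth]
        cases hget : PySem.Dict.get? tbl (getI y 0 - getI x 0, getI y 1 - getI x 1) with
        | some ch =>
            have hA := mkB_append e (getI y 0 - getI x 0) (getI y 1 - getI x 1)
              (getI y 2 - getI x 2 + f) f 0
            rw [hget] at hA
            dsimp only at hA ⊢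
            rw [← hA]
            exact ih y _ _ 0 _ _ (fun h => absurd rfl h)
        | none =>
            have hA := mkB_append e (getI y 0 - getI x 0) (getI y 1 - getI x 1)
              (getI y 2 - getI x 2 + f) f 0
            rw [hget] at hA
            dsimp only at hA ⊢
            rw [← hA]
            exact ih y _ _ 0 _ _ (fun h => absurd rfl h)

theorem mkB_nil : mkB [] 0 = ("", "", "", (0 : Int)) := by
  unfold mkB
  simp [fun_f_loop, pvJoin_nil]

theorem fun_f_as_mkB (tl : List (List Int)) :
    fun_f tl = (mkB (fun_c tl) 0).1 ++ "!!" ++ (mkB (fun_c tl) 0).2.1 ++ "!!" ++ (mkB (fun_c tl) 0).2.2.1 := by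
  unfold fun_f mkB
  rcases hE : fun_f_loop (fun_c tl) ([], [], []) with ⟨G, H, I⟩
  simp only [hE]

theorem tbl_zero : PySem.Dict.get? tbl (0, 0) = (none : Option Char) := by decide

-- ===== VERDICT (by name: the statement is the Claim_ definition above) =====
theorem fun_f_spec : Claim_equal_fun_f := by
  intro tl hdom hpre
  unfold Spec_fun_f
  match tl with
  | [] =>
      show fun_f [] = fun_f_alt []
      rw [fun_f_as_mkB]
      unfold fun_f_alt fun_c
      simp [fun_c_loop, fun_f_alt_loop, mkB_nil]
  | [x] =>
      show fun_f [x] = fun_f_alt [x]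
      rw [fun_f_as_mkB]
      unfold fun_f_alt fun_c
      simp [fun_c_loop, fun_f_alt_loop, mkB_nil]
  | x :: y :: rest =>
      show fun_f (x :: y :: rest) = fun_f_alt (x :: y :: rest)
      obtain ⟨Heq, Hpost⟩ := pv_main (y :: rest) x [] [] 0 0 0 (fun h => absurd rfl h)
      rw [fun_f_as_mkB]
      unfold fun_f_alt fun_c
      rw [← mkB_nil, Heq]
      rcases hP : fun_c_loop (x :: y :: rest) ([], [], 0, 0, 0) with ⟨g', e', f', b', c'⟩
      rw [hP] at Hpost
      by_cases hf : f' = 0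
      · subst hf
        simp only [ne_eq, not_true_eq_false, if_false]
        rw [mkB_fourth]
        simp
      · obtain ⟨hb, hc⟩ := Hpost hf
        subst hb; subst hc
        simp only [ne_eq, hf, not_false_iff, if_pos]
        have hA := mkB_append e' 0 0 f' 0 0
        rw [tbl_zero] at hA
        dsimp only at hA
        rw [hA, mkB_fourth]
        rw [if_pos (show ¬f' = 0 from hf), ← mkB_carry e' f' 0]
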